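-- pv_equiv track=rewrite | github.com/CapstoneMates/MentalHealthRiskPrediction | Final_Model/Application/app.py | build_display_mapping
-- ===== SOURCE A (Python) =====
-- def build_display_mapping(classes):
--     mapping = {}
--     for c in classes:
--         cleaned = str(c).strip().lower()
--         display = cleaned.title()
--         if display not in mapping:
--             mapping[display] = c
--     return dict(sorted(mapping.items()))
-- ===== SOURCE B (Python) =====
-- def build_display_mapping(classes):
--     pairs = sorted(((str(c).strip().lower().title(), c) for c in classes), key=lambda p: p[0])
--     result = {}
--     last = None
--     for k, v in pairs:
--         if k != last:
--             result[k] = v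
--             last = k
--     return result
-- ===== Notes on version B (the rewrite author's own statement) =====
-- stated objective: alternative
-- what changed: A dedups display keys into a dict first (first occurrence wins) and then sorts the dict items; B maps every class to a (display, class) pair, stable-sorts all pairs by the display key, and emits one pair per key by skipping consecutive duplicates in a single scan.
import Mathlib
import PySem

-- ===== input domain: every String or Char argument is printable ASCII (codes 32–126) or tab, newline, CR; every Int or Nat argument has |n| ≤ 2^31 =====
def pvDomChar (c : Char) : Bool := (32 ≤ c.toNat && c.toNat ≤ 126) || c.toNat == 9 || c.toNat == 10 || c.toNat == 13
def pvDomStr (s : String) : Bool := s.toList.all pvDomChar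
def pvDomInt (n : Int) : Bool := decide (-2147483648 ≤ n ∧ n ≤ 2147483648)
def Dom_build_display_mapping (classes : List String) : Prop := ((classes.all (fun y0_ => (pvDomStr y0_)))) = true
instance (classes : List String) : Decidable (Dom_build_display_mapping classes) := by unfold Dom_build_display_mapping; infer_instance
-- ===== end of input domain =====

-- B replaces A's dict-dedup-then-sort-items by sort-all-(display,class)-pairs-then-scan skipping
-- consecutive duplicate keys (objective: alternative decomposition, similar cost).

-- ===== PORT A =====
-- str.title() ported by hand over List Char (exact on the ASCII domain: a letter is upper-cased
-- after a non-letter and lower-cased after a letter; ASCII cased characters are exactly the letters).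
def pyTitleAux : Bool → List Char → List Char
  | _, [] => []
  | prev, c :: rest =>
    if PySem.Chars.isalpha c then
      (if prev then PySem.Chars.lowerChar c else PySem.Chars.upperChar c) :: pyTitleAux true rest
    else c :: pyTitleAux false rest

-- display = str(c).strip().lower().title()  (shared by both ports: both Pythons compute this chain)
def pyDisplay (c : String) : String :=
  String.ofList (pyTitleAux false (PySem.Str.lower (PySem.Str.strip c)).toList)

def build_display_mapping (classes : List String) : List (String × String) :=
  let mapping := classes.foldl
    (fun (m : PySem.Dict String String) c =>
      let display := pyDisplay c
      if m.contains display then m else m.insert display c)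
    PySem.Dict.empty
  PySem.List.sorted2 mapping.items (fun p => p.1) (fun p => p.2) false

-- ===== PORT B =====
def build_display_mapping_alt (classes : List String) : List (String × String) :=
  let pairs := classes.map (fun c => (pyDisplay c, c))
  let sortedPairs := PySem.List.sorted pairs (fun p => p.1) false
  let st := sortedPairs.foldl
    (fun (st : PySem.Dict String String × Option String) p =>
      if some p.1 = st.2 then st else (st.1.insert p.1 p.2, some p.1))
    (PySem.Dict.empty, none)
  st.1.items

-- ===== PRECONDITION & SPEC =====
def Spec_build_display_mapping (classes : List String) (out : List (String × String)) : Prop := out = build_display_mapping_alt classes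
instance (classes : List String) (out : List (String × String)) : Decidable (Spec_build_display_mapping classes out) := by unfold Spec_build_display_mapping; infer_instance

-- ===== CLAIM (what is proved, stated in full; the proofs are below) =====
def Claim_equal_build_display_mapping : Prop := ∀ (classes : List String), Dom_build_display_mapping classes → Spec_build_display_mapping classes (build_display_mapping classes)

-- ===== LEMMAS AND PROOFS =====

-- A's dict loop, as a pure list function: keep the first pair for each yet-unseen key.
def dedupFst : List (String × String) → List String → List (String × String)
  | [], _ => []
  | p :: rest, seen =>
    if p.1 ∈ seen then dedupFst rest seen else p :: dedupFst rest (p.1 :: seen)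

-- B's scan, as a pure list function: drop pairs whose key equals the last emitted key.
def cdrop : List (String × String) → Option String → List (String × String)
  | [], _ => []
  | p :: rest, last =>
    if some p.1 = last then cdrop rest last else p :: cdrop rest (some p.1)

theorem contains_iff (d : PySem.Dict String String) (k : String) :
    d.contains k = true ↔ k ∈ d.items.map Prod.fst := by
  simp [PySem.Dict.contains, List.any_eq_true]

theorem dedupFst_seen_congr (l : List (String × String)) (s₁ s₂ : List String)
    (h : ∀ k, k ∈ s₁ ↔ k ∈ s₂) : dedupFst l s₁ = dedupFst l s₂ := by
  induction l generalizing s₁ s₂ with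
  | nil => rfl
  | cons p rest ih =>
    rw [dedupFst, dedupFst]
    by_cases hm : p.1 ∈ s₁
    · rw [if_pos hm, if_pos ((h p.1).1 hm), ih _ _ h]
    · rw [if_neg hm, if_neg (fun hx => hm ((h p.1).2 hx))]
      rw [ih (p.1 :: s₁) (p.1 :: s₂) (by intro k; simp [h k])]

theorem dictFold_items (l : List String) (d : PySem.Dict String String) :
    (l.foldl
      (fun (m : PySem.Dict String String) c =>
        let display := pyDisplay c
        if m.contains display then m else m.insert display c) d).items
    = d.items ++ dedupFst (l.map (fun c => (pyDisplay c, c))) (d.items.map Prod.fst) := by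
  induction l generalizing d with
  | nil => simp [dedupFst]
  | cons c rest ih =>
    simp only [List.foldl_cons, List.map_cons]
    rw [dedupFst]
    by_cases hc : d.contains (pyDisplay c) = true
    · rw [if_pos hc, if_pos ((contains_iff d (pyDisplay c)).1 hc), ih]
    · have hnc : d.contains (pyDisplay c) = false := by simpa using hc
      have hmem : pyDisplay c ∉ d.items.map Prod.fst := fun h => hc ((contains_iff d _).2 h)
      rw [if_neg (by simp [hnc]), if_neg hmem, ih]
      have hins : (d.insert (pyDisplay c) c).items = d.items ++ [(pyDisplay c, c)] := by
        simp [PySem.Dict.insert, hnc]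
      rw [hins]
      rw [List.append_assoc]
      congr 1
      rw [List.singleton_append]
      congr 1
      rw [List.map_append]
      exact dedupFst_seen_congr _ _ _ (by intro k; simp [or_comm])

theorem mem_dedupFst (q : String × String) (l : List (String × String)) (seen : List String) :
    q ∈ dedupFst l seen ↔ q.1 ∉ seen ∧ l.find? (fun r => r.1 == q.1) = some q := by
  induction l generalizing seen with
  | nil => simp [dedupFst]
  | cons p rest ih =>
    rw [dedupFst, List.find?_cons]
    by_cases hmem : p.1 ∈ seen
    · rw [if_pos hmem, ih]
      by_cases he : p.1 = q.1
      · have hb : (p.1 == q.1) = true := by simpa using he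
        rw [hb]
        simp only [Option.some.injEq]
        constructor
        · rintro ⟨hq, _⟩; exact absurd (he ▸ hmem) hq
        · rintro ⟨hq, _⟩; exact absurd (he ▸ hmem) hq
      · have : (p.1 == q.1) = false := by simpa using he
        rw [this]
    · rw [if_neg hmem]
      by_cases he : p.1 = q.1
      · have hb : (p.1 == q.1) = true := by simpa using he
        rw [hb]
        simp only [List.mem_cons, ih, List.mem_cons]
        constructor
        · rintro (rfl | ⟨hns, _⟩)
          · exact ⟨by rw [← he]; exact hmem, rfl⟩
          · exact absurd (Or.inl he.symm) hns
        · rintro ⟨hq, hsome⟩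
          exact Or.inl (by cases hsome; rfl)
      · have hb : (p.1 == q.1) = false := by simpa using he
        rw [hb]
        simp only [List.mem_cons, ih, List.mem_cons]
        constructor
        · rintro (rfl | ⟨hns, hf⟩)
          · exact absurd rfl he
          · exact ⟨fun h => hns (Or.inr h), hf⟩
        · rintro ⟨hq, hf⟩
          exact Or.inr ⟨by rintro (h | h); exact he h.symm; exact hq h, hf⟩

theorem pairwise_ne_dedupFst (l : List (String × String)) (seen : List String) :
    (dedupFst l seen).Pairwise (fun a b => a.1 ≠ b.1) := by
  induction l generalizing seen with
  | nil => exact List.Pairwise.nil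
  | cons p rest ih =>
    rw [dedupFst]
    split
    · exact ih seen
    · refine List.Pairwise.cons ?_ (ih _)
      intro q hq
      have := (mem_dedupFst q rest (p.1 :: seen)).1 hq
      intro he; exact this.1 (by simp [← he])

theorem insertBy_congr {α : Type} (b₁ b₂ : α → α → Bool) (x : α) (acc : List α)
    (h : ∀ y ∈ acc, b₁ x y = b₂ x y) :
    PySem.List.insertBy b₁ x acc = PySem.List.insertBy b₂ x acc := by
  induction acc with
  | nil => rfl
  | cons y ys ih =>
    simp only [PySem.List.insertBy]
    rw [h y (by simp)]
    split
    · rfl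
    · rw [ih (fun z hz => h z (by simp [hz]))]

theorem perm_insertBy {α : Type} (b : α → α → Bool) (x : α) (l : List α) :
    (PySem.List.insertBy b x l).Perm (x :: l) := by
  induction l with
  | nil => simp [PySem.List.insertBy]
  | cons y ys ih =>
    simp only [PySem.List.insertBy]
    split
    · exact List.Perm.refl _
    · exact (ih.cons y).trans (List.Perm.swap x y ys)

theorem sorted2_eq_sorted_aux (l acc : List (String × String))
    (h : ((l ++ acc).map Prod.fst).Nodup) :
    l.foldl (fun a x => PySem.List.insertBy
        (fun a b => decide (a.1 < b.1) || !decide (b.1 < a.1) && decide (a.2 < b.2)) x a) acc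
      = l.foldl (fun a x => PySem.List.insertBy (fun a b => decide (a.1 < b.1)) x a) acc := by
  induction l generalizing acc with
  | nil => rfl
  | cons x rest ih =>
    simp only [List.foldl_cons]
    have hxy : ∀ y ∈ acc, x.1 ≠ y.1 := by
      intro y hy he
      have : ((x :: (rest ++ acc)).map Prod.fst).Nodup := by simpa using h
      rw [List.map_cons, List.nodup_cons] at this
      exact this.1 (by rw [he]; exact List.mem_map_of_mem (by simp [hy]))
    have hc : PySem.List.insertBy
        (fun a b => decide (a.1 < b.1) || !decide (b.1 < a.1) && decide (a.2 < b.2)) x acc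
        = PySem.List.insertBy (fun a b => decide (a.1 < b.1)) x acc := by
      apply insertBy_congr
      intro y hy
      have hne := hxy y hy
      by_cases hlt : x.1 < y.1
      · simp [hlt]
      · have hgt : y.1 < x.1 := lt_of_le_of_ne (not_lt.1 hlt) (fun he => hne he.symm)
        simp [hlt, hgt]
    rw [hc]
    apply ih
    have hperm : (rest ++ PySem.List.insertBy (fun a b => decide (a.1 < b.1)) x acc).Perm
        ((x :: rest) ++ acc) :=
      (List.Perm.append_left rest (perm_insertBy _ _ _)).trans List.perm_middle
    exact ((hperm.map Prod.fst).nodup_iff).2 (by simpa using h)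

theorem sorted2_eq_sorted_of_nodupFst (l : List (String × String))
    (h : (l.map Prod.fst).Nodup) :
    PySem.List.sorted2 l (fun p => p.1) (fun p => p.2) false
      = PySem.List.sorted l (fun p => p.1) false := by
  show l.foldl _ [] = l.foldl _ []
  simpa using sorted2_eq_sorted_aux l [] (by simpa using h)

theorem insertBy_pairwise (x : String × String) (acc : List (String × String))
    (h : acc.Pairwise (fun a b => a.1 ≤ b.1)) :
    (PySem.List.insertBy (fun a b => decide (a.1 < b.1)) x acc).Pairwise (fun a b => a.1 ≤ b.1) := by
  induction acc with
  | nil => simp [PySem.List.insertBy]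
  | cons y ys ih =>
    rw [List.pairwise_cons] at h
    simp only [PySem.List.insertBy]
    split
    · rename_i hlt
      refine List.Pairwise.cons ?_ (List.Pairwise.cons h.1 h.2)
      intro z hz
      rcases List.mem_cons.1 hz with rfl | hz'
      · exact le_of_lt (by simpa using hlt)
      · exact le_trans (le_of_lt (by simpa using hlt)) (h.1 z hz')
    · rename_i hnlt
      refine List.Pairwise.cons ?_ (ih h.2)
      intro z hz
      rcases List.mem_cons.1 ((perm_insertBy _ x ys).mem_iff.1 hz) with rfl | h2
      · exact not_lt.1 (by simpa using hnlt)
      · exact h.1 z h2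

theorem filter_insertBy (k : String) (x : String × String) (acc : List (String × String))
    (h : acc.Pairwise (fun a b => a.1 ≤ b.1)) :
    (PySem.List.insertBy (fun a b => decide (a.1 < b.1)) x acc).filter (fun r => r.1 == k)
      = if x.1 == k then acc.filter (fun r => r.1 == k) ++ [x] else acc.filter (fun r => r.1 == k) := by
  induction acc with
  | nil => simp [PySem.List.insertBy]; split <;> simp_all
  | cons y ys ih =>
    rw [List.pairwise_cons] at h
    simp only [PySem.List.insertBy]
    split
    · rename_i hlt
      have hlt' : x.1 < y.1 := by simpa using hlt
      by_cases hxk : x.1 = k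
      · have hempty : (y :: ys).filter (fun r => r.1 == k) = [] := by
          rw [List.filter_eq_nil_iff]
          intro z hz
          rcases List.mem_cons.1 hz with rfl | hz'
          · simp; intro he; rw [he, ← hxk] at hlt'; exact lt_irrefl _ hlt'
          · have : y.1 ≤ z.1 := h.1 z hz'
            simp; intro he
            rw [he, ← hxk] at this
            exact absurd (lt_of_lt_of_le hlt' this) (lt_irrefl _)
        rw [if_pos (by simpa using hxk)]
        rw [List.filter_cons, if_pos (by simpa using hxk), hempty]
        simp
      · rw [if_neg (by simpa using hxk)]
        rw [List.filter_cons, if_neg (by simpa using hxk)]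
    · rename_i hnlt
      rw [List.filter_cons, ih h.2, List.filter_cons]
      by_cases hxk : x.1 = k <;> by_cases hyk : y.1 = k <;> simp [hxk, hyk]

theorem filter_sorted_aux (k : String) (xs acc : List (String × String))
    (h : acc.Pairwise (fun a b => a.1 ≤ b.1)) :
    (xs.foldl (fun a x => PySem.List.insertBy (fun a b => decide (a.1 < b.1)) x a) acc).filter
        (fun r => r.1 == k)
      = acc.filter (fun r => r.1 == k) ++ xs.filter (fun r => r.1 == k) := by
  induction xs generalizing acc with
  | nil => simp
  | cons x rest ih =>
    simp only [List.foldl_cons]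
    rw [ih _ (insertBy_pairwise x acc h), filter_insertBy k x acc h, List.filter_cons]
    by_cases hxk : x.1 = k
    · rw [if_pos (by simpa using hxk), if_pos (by simpa using hxk)]; simp
    · rw [if_neg (by simpa using hxk), if_neg (by simpa using hxk)]

-- stability of the sort, for a single key class
theorem filter_sorted_key (xs : List (String × String)) (k : String) :
    (PySem.List.sorted xs (fun p => p.1) false).filter (fun r => r.1 == k)
      = xs.filter (fun r => r.1 == k) := by
  show (xs.foldl _ []).filter _ = _
  simpa using filter_sorted_aux k xs [] List.Pairwise.nil

theorem find?_eq_head?_filter {α : Type} (p : α → Bool) (l : List α) :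
    l.find? p = (l.filter p).head? := by
  induction l with
  | nil => rfl
  | cons x xs ih =>
    rw [List.find?_cons, List.filter_cons]
    cases h : p x
    · show List.find? p xs = _
      rw [ih]
      rfl
    · simp

theorem mem_cdrop_strict (L : List (String × String)) (last : Option String)
    (hs : L.Pairwise (fun a b => a.1 ≤ b.1))
    (hinv : ∀ k, last = some k → ∀ r ∈ L, k ≤ r.1)
    (q : String × String) (hq : q ∈ cdrop L last) :
    q ∈ L ∧ ∀ k, last = some k → k < q.1 := by
  induction L generalizing last with
  | nil => simp [cdrop] at hq
  | cons p rest ih =>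
    rw [List.pairwise_cons] at hs
    rw [cdrop] at hq
    by_cases hsk : some p.1 = last
    · rw [if_pos hsk] at hq
      have := ih last hs.2 (fun k hk r hr => hinv k hk r (List.mem_cons_of_mem _ hr)) hq
      exact ⟨List.mem_cons_of_mem _ this.1, this.2⟩
    · rw [if_neg hsk] at hq
      rcases List.mem_cons.1 hq with rfl | hq'
      · refine ⟨List.mem_cons_self, ?_⟩
        intro k hk
        have h1 : k ≤ q.1 := hinv k hk q List.mem_cons_self
        exact lt_of_le_of_ne h1 (fun he => hsk (by rw [hk, he]))
      · have := ih (some p.1) hs.2 (fun k hk r hr => by cases hk; exact hs.1 r hr) hq'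
        refine ⟨List.mem_cons_of_mem _ this.1, ?_⟩
        intro k hk
        have h1 : k ≤ p.1 := hinv k hk p List.mem_cons_self
        exact lt_of_le_of_lt h1 (this.2 p.1 rfl)

theorem pairwise_cdrop (L : List (String × String)) (last : Option String)
    (hs : L.Pairwise (fun a b => a.1 ≤ b.1))
    (hinv : ∀ k, last = some k → ∀ r ∈ L, k ≤ r.1) :
    (cdrop L last).Pairwise (fun a b => a.1 < b.1) := by
  induction L generalizing last with
  | nil => exact List.Pairwise.nil
  | cons p rest ih =>
    rw [List.pairwise_cons] at hs
    rw [cdrop]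
    by_cases hsk : some p.1 = last
    · rw [if_pos hsk]
      exact ih last hs.2 (fun k hk r hr => hinv k hk r (List.mem_cons_of_mem _ hr))
    · rw [if_neg hsk]
      refine List.Pairwise.cons ?_ (ih (some p.1) hs.2 (fun k hk r hr => by cases hk; exact hs.1 r hr))
      intro q hq
      exact (mem_cdrop_strict rest (some p.1) hs.2
        (fun k hk r hr => by cases hk; exact hs.1 r hr) q hq).2 p.1 rfl

theorem mem_cdrop_iff (L : List (String × String)) (last : Option String)
    (hs : L.Pairwise (fun a b => a.1 ≤ b.1))
    (hinv : ∀ k, last = some k → ∀ r ∈ L, k ≤ r.1)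
    (q : String × String) :
    q ∈ cdrop L last ↔ (L.find? (fun r => r.1 == q.1) = some q ∧ ∀ k, last = some k → q.1 ≠ k) := by
  induction L generalizing last with
  | nil => simp [cdrop]
  | cons p rest ih =>
    rw [List.pairwise_cons] at hs
    rw [cdrop, List.find?_cons]
    by_cases hsk : some p.1 = last
    · rw [if_pos hsk]
      have hinv' : ∀ k, last = some k → ∀ r ∈ rest, k ≤ r.1 :=
        fun k hk r hr => hinv k hk r (List.mem_cons_of_mem _ hr)
      rw [ih last hs.2 hinv']
      by_cases he : p.1 = q.1
      · have hb : (p.1 == q.1) = true := by simpa using he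
        rw [hb]
        constructor
        · rintro ⟨hf, hne⟩
          exact absurd he.symm (hne p.1 hsk.symm)
        · rintro ⟨hf, hne⟩
          exact absurd he.symm (hne p.1 hsk.symm)
      · have hb : (p.1 == q.1) = false := by simpa using he
        rw [hb]
    · rw [if_neg hsk]
      have hinv' : ∀ k, some p.1 = some k → ∀ r ∈ rest, k ≤ r.1 :=
        fun k hk r hr => by cases hk; exact hs.1 r hr
      by_cases he : p.1 = q.1
      · have hb : (p.1 == q.1) = true := by simpa using he
        rw [hb]
        constructor
        · rintro hq
          rcases List.mem_cons.1 hq with rfl | hq'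
          · exact ⟨rfl, fun k hk hqe => hsk (by rw [hk, he, hqe])⟩
          · have := (ih (some p.1) hs.2 hinv' |>.1 hq')
            exact absurd he.symm (this.2 p.1 rfl)
        · rintro ⟨hf, hne⟩
          cases hf
          exact List.mem_cons_self
      · have hb : (p.1 == q.1) = false := by simpa using he
        rw [hb]
        constructor
        · rintro hq
          rcases List.mem_cons.1 hq with rfl | hq'
          · exact absurd rfl he
          · obtain ⟨hf', hne'⟩ := (ih (some p.1) hs.2 hinv').1 hq'
            refine ⟨hf', ?_⟩
            intro k hk hqe
            have hk1 : k ≤ p.1 := hinv k hk p List.mem_cons_self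
            have hk2 : k ≠ p.1 := fun hh => hsk (by rw [hk, hh])
            have hq1 : q ∈ rest := List.mem_of_find?_eq_some hf'
            have : p.1 ≤ q.1 := hs.1 q hq1
            rw [hqe] at this
            exact hk2 (le_antisymm hk1 this)
        · rintro ⟨hf, hne⟩
          refine List.mem_cons_of_mem _ ?_
          rw [ih (some p.1) hs.2 hinv']
          exact ⟨hf, fun k hk => by cases hk; exact fun hh => he hh.symm⟩

theorem foldB_items (L : List (String × String)) (d : PySem.Dict String String) (last : Option String)
    (hs : L.Pairwise (fun a b => a.1 ≤ b.1))
    (hinv : ∀ k, last = some k → ((∀ y ∈ d.items, y.1 ≤ k) ∧ ∀ r ∈ L, k ≤ r.1))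
    (hnone : last = none → d.items = []) :
    (L.foldl
      (fun (st : PySem.Dict String String × Option String) p =>
        if some p.1 = st.2 then st else (st.1.insert p.1 p.2, some p.1)) (d, last)).1.items
      = d.items ++ cdrop L last := by
  induction L generalizing d last with
  | nil => simp [cdrop]
  | cons p rest ih =>
    rw [List.pairwise_cons] at hs
    simp only [List.foldl_cons]
    rw [cdrop]
    by_cases hsk : some p.1 = last
    · rw [if_pos hsk, if_pos hsk]
      exact ih d last hs.2
        (fun k hk => ⟨(hinv k hk).1, fun r hr => (hinv k hk).2 r (List.mem_cons_of_mem _ hr)⟩)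
        hnone
    · rw [if_neg hsk, if_neg hsk]
      have hfresh : ∀ y ∈ d.items, y.1 < p.1 := by
        intro y hy
        cases hl : last with
        | none => rw [hnone hl] at hy; cases hy
        | some k =>
          have h1 : y.1 ≤ k := (hinv k hl).1 y hy
          have h2 : k ≤ p.1 := (hinv k hl).2 p List.mem_cons_self
          have h3 : k ≠ p.1 := fun hh => hsk (by rw [hl, hh])
          exact lt_of_le_of_lt h1 (lt_of_le_of_ne h2 h3)
      have hnc : d.contains p.1 = false := by
        rw [PySem.Dict.contains]
        rw [List.any_eq_false]
        intro y hy
        simp only [beq_iff_eq]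
        exact ne_of_lt (hfresh y hy)
      have hins : (d.insert p.1 p.2).items = d.items ++ [p] := by
        simp [PySem.Dict.insert, hnc]
      rw [ih (d.insert p.1 p.2) (some p.1) hs.2 ?_ (by intro h; cases h)]
      · rw [hins, List.append_assoc, List.singleton_append]
      · intro k hk
        cases hk
        constructor
        · intro y hy
          rw [hins] at hy
          rcases List.mem_append.1 hy with hy' | hy'
          · exact le_of_lt (hfresh y hy')
          · simp at hy'; rw [hy']
        · exact hs.1

theorem build_display_mapping_eq (classes : List String) :
    build_display_mapping classes = build_display_mapping_alt classes := by
  -- abbreviations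
  set pairs := classes.map (fun c => (pyDisplay c, c)) with hp
  set D := dedupFst pairs [] with hD
  set S := PySem.List.sorted pairs (fun p => p.1) false with hS
  have hsortS : S.Pairwise (fun a b => a.1 ≤ b.1) := PySem.List.sorted_pairwise pairs (fun p => p.1)
  -- A's side
  have hA : build_display_mapping classes
      = PySem.List.sorted2 D (fun p => p.1) (fun p => p.2) false := by
    show PySem.List.sorted2 (List.foldl _ PySem.Dict.empty classes).items _ _ false = _
    rw [dictFold_items classes PySem.Dict.empty]
    rfl
  -- B's side
  have hB : build_display_mapping_alt classes = cdrop S none := by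
    show (S.foldl _ (PySem.Dict.empty, none)).1.items = _
    rw [foldB_items S PySem.Dict.empty none hsortS (by intro k hk; cases hk) (fun _ => rfl)]
    rfl
  -- shared membership characterisation
  have hmemD : ∀ q, q ∈ D ↔ pairs.find? (fun r => r.1 == q.1) = some q := by
    intro q
    rw [hD, mem_dedupFst]
    simp
  have hfind : ∀ k, S.find? (fun r => r.1 == k) = pairs.find? (fun r => r.1 == k) := by
    intro k
    rw [find?_eq_head?_filter, find?_eq_head?_filter, hS, filter_sorted_key]
  have hmemC : ∀ q, q ∈ cdrop S none ↔ pairs.find? (fun r => r.1 == q.1) = some q := by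
    intro q
    rw [mem_cdrop_iff S none hsortS (by intro k hk; cases hk), hfind]
    simp
  -- nodups
  have hnodD : D.Nodup :=
    (pairwise_ne_dedupFst pairs []).imp (fun {a b} h he => h (by rw [he]))
  have hpwC : (cdrop S none).Pairwise (fun a b => a.1 < b.1) :=
    pairwise_cdrop S none hsortS (by intro k hk; cases hk)
  have hnodC : (cdrop S none).Nodup :=
    hpwC.imp (fun {a b} h he => absurd (by rw [he] at h; exact h) (lt_irrefl _))
  -- permutation
  have hperm : (cdrop S none).Perm D := by
    rw [List.perm_ext_iff_of_nodup hnodC hnodD]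
    intro q
    rw [hmemC q, hmemD q]
  -- D has nodup keys
  have hnodfst : (D.map Prod.fst).Nodup := by
    have h := pairwise_ne_dedupFst pairs []
    exact List.Pairwise.map Prod.fst (fun a b hab => hab) h
  rw [hA, hB, sorted2_eq_sorted_of_nodupFst D hnodfst]
  exact PySem.List.sorted_eq_of_perm_of_pairwise_lt D (cdrop S none) (fun p => p.1) hperm hpwC

-- ===== VERDICT (by name: the statement is the Claim_ definition above) =====
theorem build_display_mapping_spec : Claim_equal_build_display_mapping := by
  intro classes _
  exact build_display_mapping_eq classes
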